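-- pv_equiv track=rewrite | github.com/nir3y/mahjong-analyzer | backend/analyzer/mahjong_analyzer.py | shanten
-- ===== SOURCE A (Python) =====
-- def shanten(tiles: list[int], meld_count: int = 0) -> int:
--     """Return shanten number for a standard hand, with light special-hand support."""
--     counts = [0] * 34
--     for t in tiles:
--         if 0 <= t < 34:
--             counts[t] += 1
--
--     needed_groups = max(0, 4 - meld_count)
--     best = max(0, 8 - meld_count * 2)
--
--     for pair in range(34):
--         if counts[pair] < 2:
--             continue
--         counts[pair] -= 2
--         best = min(best, _calc_shanten_mentsu(counts, needed_groups, True))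
--         counts[pair] += 2
--
--     best = min(best, _calc_shanten_mentsu(counts, needed_groups, False))
--
--     if meld_count == 0:
--         pairs = sum(1 for c in counts if c >= 2)
--         best = min(best, 6 - pairs)
--
--         terminals = [0, 8, 9, 17, 18, 26, 27, 28, 29, 30, 31, 32, 33]
--         unique = sum(1 for t in terminals if counts[t] >= 1)
--         has_pair = any(counts[t] >= 2 for t in terminals)
--         best = min(best, 13 - unique - (1 if has_pair else 0))
--
--     return best
--
-- def _calc_shanten_mentsu(counts: list[int], needed: int, has_pair: bool) -> int:
--     if needed == 0:
--         return -1 if has_pair else 0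
--
--     best = needed * 2 + (0 if has_pair else 1)
--
--     for i in range(34):
--         if counts[i] == 0:
--             continue
--
--         if counts[i] >= 3:
--             counts[i] -= 3
--             best = min(best, _calc_shanten_mentsu(counts, needed - 1, has_pair))
--             counts[i] += 3
--
--         if i < 27 and i % 9 <= 6 and counts[i + 1] > 0 and counts[i + 2] > 0:
--             counts[i] -= 1
--             counts[i + 1] -= 1
--             counts[i + 2] -= 1
--             best = min(best, _calc_shanten_mentsu(counts, needed - 1, has_pair))
--             counts[i] += 1
--             counts[i + 1] += 1
--             counts[i + 2] += 1
--
--     return best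
-- ===== SOURCE B (Python) =====
-- def shanten(tiles: list[int], meld_count: int = 0) -> int:
--     """Return shanten number for a standard hand, with light special-hand support.
--
--     Memoized variant: the decomposition search keys on immutable count tuples, with
--     the memo dict shared across all pair choices; the has_pair flag is dropped
--     (a hand with the pair set aside is always exactly one step better).
--     """
--     counts = [0] * 34
--     for t in tiles:
--         if 0 <= t < 34:
--             counts[t] += 1
--
--     needed = max(0, 4 - meld_count)
--     base = tuple(counts)
--     memo = {}
--
--     candidates = [max(0, 8 - meld_count * 2)]
--     for p in range(34):
--         if base[p] >= 2:
--             reduced = base[:p] + (base[p] - 2,) + base[p + 1:]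
--             candidates.append(_dist(memo, reduced, needed) - 1)
--     candidates.append(_dist(memo, base, needed))
--
--     if meld_count == 0:
--         pairs = sum(c >= 2 for c in base)
--         candidates.append(6 - pairs)
--         terminals = (0, 8, 9, 17, 18, 26, 27, 28, 29, 30, 31, 32, 33)
--         unique = sum(base[t] >= 1 for t in terminals)
--         has_pair = any(base[t] >= 2 for t in terminals)
--         candidates.append(13 - unique - (1 if has_pair else 0))
--
--     return min(candidates)
--
--
-- def _dist(memo, counts, needed):
--     """2*needed+1 lowered by 2 per extractable meld (pairless shanten distance + 1)."""
--     if needed == 0: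
--         return 0
--     key = (counts, needed)
--     val = memo.get(key)
--     if val is None:
--         val = needed * 2 + 1
--         for i in range(34):
--             if counts[i] >= 3:
--                 nxt = counts[:i] + (counts[i] - 3,) + counts[i + 1:]
--                 val = min(val, _dist(memo, nxt, needed - 1))
--             if counts[i] and i < 27 and i % 9 <= 6 and counts[i + 1] > 0 and counts[i + 2] > 0:
--                 nxt = (counts[:i] + (counts[i] - 1, counts[i + 1] - 1, counts[i + 2] - 1)
--                        + counts[i + 3:])
--                 val = min(val, _dist(memo, nxt, needed - 1))
--         memo[key] = val
--     return val
-- ===== Notes on version B (the rewrite author's own statement) =====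
-- stated objective: alternative
-- what changed: B replaces A's naive recursive decomposition search (re-run independently for every pair choice, with a has_pair flag threaded through) by a memoized search on immutable count tuples whose dict is shared across all pair choices, with the has_pair flag eliminated by the identity result(counts, needed, True) = result(counts, needed, False) - 1 and the final value taken as the min of a candidate list.
import Mathlib
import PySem

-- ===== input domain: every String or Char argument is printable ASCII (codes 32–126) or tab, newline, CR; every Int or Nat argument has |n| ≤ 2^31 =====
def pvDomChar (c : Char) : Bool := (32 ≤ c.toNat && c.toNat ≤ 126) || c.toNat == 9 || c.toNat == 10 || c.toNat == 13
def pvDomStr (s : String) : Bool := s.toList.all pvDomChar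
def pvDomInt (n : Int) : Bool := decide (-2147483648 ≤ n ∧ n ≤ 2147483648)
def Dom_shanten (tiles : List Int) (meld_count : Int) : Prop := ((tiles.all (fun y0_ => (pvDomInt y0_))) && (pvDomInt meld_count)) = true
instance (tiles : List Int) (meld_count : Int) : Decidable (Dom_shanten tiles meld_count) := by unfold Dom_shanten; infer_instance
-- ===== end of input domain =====

-- B restructures A's recursive decomposition search as a memoized search on immutable
-- count vectors shared across pair choices, with the has_pair flag eliminated
-- arithmetically (objective: alternative).

-- ===== PORT A =====
-- port of _calc_shanten_mentsu: the recursion is split into the function head (calcA)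
-- and its `for i in range(34)` loop (calcALoop, which receives m = needed - 1);
-- counts[i] is c.getD i 0 (the list always has length 34), mutation+restore is pure reuse.
mutual
def calcA (c : List Int) (n : Nat) (hp : Bool) : Int :=
  if n = 0 then (if hp then -1 else 0)
  else calcALoop c (n - 1) hp 0 ((n : Int) * 2 + (if hp then 0 else 1))
  termination_by 36 * n + 35
  decreasing_by all_goals omega

def calcALoop (c : List Int) (m : Nat) (hp : Bool) (i : Nat) (best : Int) : Int :=
  if i < 34 then
    if c.getD i 0 = 0 then calcALoop c m hp (i + 1) best
    else
      let b1 := if 3 ≤ c.getD i 0 then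
          min best (calcA (c.set i (c.getD i 0 - 3)) m hp)
        else best
      let b2 := if i < 27 ∧ i % 9 ≤ 6 ∧ 0 < c.getD (i + 1) 0 ∧ 0 < c.getD (i + 2) 0 then
          let c1 := c.set i (c.getD i 0 - 1)
          let c2 := c1.set (i + 1) (c1.getD (i + 1) 0 - 1)
          let c3 := c2.set (i + 2) (c2.getD (i + 2) 0 - 1)
          min b1 (calcA c3 m hp)
        else b1
      calcALoop c m hp (i + 1) b2
  else best
  termination_by 36 * (m + 1) + (34 - i)
  decreasing_by all_goals omega
end

def pairLoopA (c : List Int) (needed : Nat) (p : Nat) (best : Int) : Int :=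
  if p < 34 then
    if c.getD p 0 < 2 then pairLoopA c needed (p + 1) best
    else pairLoopA c needed (p + 1)
      (min best (calcA (c.set p (c.getD p 0 - 2)) needed true))
  else best
termination_by 34 - p

def shanten (tiles : List Int) (meld_count : Int) : Int :=
  let counts := tiles.foldl
    (fun c t => if 0 ≤ t ∧ t < 34 then c.set t.toNat (c.getD t.toNat 0 + 1) else c)
    (List.replicate 34 0)
  let needed := (max 0 (4 - meld_count)).toNat
  let best0 := max 0 (8 - meld_count * 2)
  let best1 := pairLoopA counts needed 0 best0
  let best2 := min best1 (calcA counts needed false)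
  if meld_count = 0 then
    let pairs := counts.foldl (fun a c => if 2 ≤ c then a + 1 else a) (0 : Int)
    let best3 := min best2 (6 - pairs)
    let terminals : List Nat := [0, 8, 9, 17, 18, 26, 27, 28, 29, 30, 31, 32, 33]
    let unique := terminals.foldl (fun a t => if 1 ≤ counts.getD t 0 then a + 1 else a) (0 : Int)
    let has_pair := terminals.any (fun t => decide (2 ≤ counts.getD t 0))
    min best3 (13 - unique - (if has_pair then 1 else 0))
  else best2

-- ===== PORT B =====
-- port of Source B: _dist threads the memo dict (PySem.Dict) through every call; tuple
-- surgery counts[:i] + (…,) + counts[j:] is List.take/drop; the candidates list of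
-- shanten is built in loop order and reduced with min (PySem.List.min?).
mutual
def distAlt (memo : PySem.Dict (List Int × Nat) Int) (c : List Int) (n : Nat) :
    Int × PySem.Dict (List Int × Nat) Int :=
  if n = 0 then (0, memo)
  else
    match memo.get? (c, n) with
    | some v => (v, memo)
    | none =>
      let r := distLoop memo c (n - 1) 0 ((n : Int) * 2 + 1)
      (r.1, r.2.insert (c, n) r.1)
  termination_by 36 * n + 35
  decreasing_by all_goals omega

def distLoop (memo : PySem.Dict (List Int × Nat) Int) (c : List Int) (m : Nat)
    (i : Nat) (val : Int) : Int × PySem.Dict (List Int × Nat) Int :=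
  if i < 34 then
    let p1 := if 3 ≤ c.getD i 0 then
        let r := distAlt memo (c.take i ++ [c.getD i 0 - 3] ++ c.drop (i + 1)) m
        (min val r.1, r.2)
      else (val, memo)
    let p2 := if c.getD i 0 ≠ 0 ∧ i < 27 ∧ i % 9 ≤ 6 ∧ 0 < c.getD (i + 1) 0 ∧ 0 < c.getD (i + 2) 0 then
        let r := distAlt p1.2
          (c.take i ++ [c.getD i 0 - 1, c.getD (i + 1) 0 - 1, c.getD (i + 2) 0 - 1] ++ c.drop (i + 3)) m
        (min p1.1 r.1, r.2)
      else p1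
    distLoop p2.2 c m (i + 1) p2.1
  else (val, memo)
  termination_by 36 * (m + 1) + (34 - i)
  decreasing_by all_goals omega
end

def pairScan (base : List Int) (needed : Nat) (p : Nat)
    (acc : List Int × PySem.Dict (List Int × Nat) Int) :
    List Int × PySem.Dict (List Int × Nat) Int :=
  if p < 34 then
    if 2 ≤ base.getD p 0 then
      let r := distAlt acc.2 (base.take p ++ [base.getD p 0 - 2] ++ base.drop (p + 1)) needed
      pairScan base needed (p + 1) (acc.1 ++ [r.1 - 1], r.2)
    else pairScan base needed (p + 1) acc
  else acc
termination_by 34 - p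

def shanten_alt (tiles : List Int) (meld_count : Int) : Int :=
  let base := tiles.foldl
    (fun c t => if 0 ≤ t ∧ t < 34 then c.set t.toNat (c.getD t.toNat 0 + 1) else c)
    (List.replicate 34 0)
  let needed := (max 0 (4 - meld_count)).toNat
  let s := pairScan base needed 0 ([max 0 (8 - meld_count * 2)], PySem.Dict.empty)
  let r := distAlt s.2 base needed
  let cands1 := s.1 ++ [r.1]
  let cands := if meld_count = 0 then
      cands1 ++
        [6 - base.foldl (fun a c => a + (if 2 ≤ c then 1 else 0)) (0 : Int),
         13 - (([0, 8, 9, 17, 18, 26, 27, 28, 29, 30, 31, 32, 33] : List Nat).foldl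
                 (fun a t => a + (if 1 ≤ base.getD t 0 then 1 else 0)) (0 : Int))
            - (if (([0, 8, 9, 17, 18, 26, 27, 28, 29, 30, 31, 32, 33] : List Nat).any
                    (fun t => decide (2 ≤ base.getD t 0))) then 1 else 0)]
    else cands1
  (PySem.List.min? cands (fun x => x)).getD 0


-- ===== PRECONDITION & SPEC =====
def Spec_shanten (tiles : List Int) (meld_count : Int) (out : Int) : Prop := out = shanten_alt tiles meld_count
instance (tiles : List Int) (meld_count : Int) (out : Int) : Decidable (Spec_shanten tiles meld_count out) := by unfold Spec_shanten; infer_instance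

-- ===== CLAIM (what is proved, stated in full; the proofs are below) =====
def Claim_equal_shanten : Prop := ∀ (tiles : List Int) (meld_count : Int), Dom_shanten tiles meld_count → Spec_shanten tiles meld_count (shanten tiles meld_count)

-- ===== LEMMAS AND PROOFS =====
-- basic list lemmas
theorem set_eq_slice (c : List Int) (i : Nat) (x : Int) (h : i < c.length) :
    c.set i x = c.take i ++ [x] ++ c.drop (i + 1) := by
  rw [List.set_eq_take_append_cons_drop, if_pos h]; simp

theorem getD_set_ne (c : List Int) (i j : Nat) (x : Int) (h : i ≠ j) :
    (c.set i x).getD j 0 = c.getD j 0 := by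
  simp [List.getD, List.getElem?_set_ne h]

theorem set3_eq_slice (c : List Int) (i : Nat) (x y z : Int) (h : i + 2 < c.length) :
    ((c.set i x).set (i + 1) y).set (i + 2) z
      = c.take i ++ [x, y, z] ++ c.drop (i + 3) := by
  apply List.ext_getElem
  · simp; omega
  · intro j h1 h2
    simp only [List.getElem_set, List.getElem_append, List.getElem_take, List.getElem_drop,
      List.length_take, List.length_append, List.length_cons, List.length_nil]
    split_ifs <;> (try rfl) <;> (try omega) <;>
      (first
        | (simp only [Nat.min_eq_left (show i ≤ c.length by omega)] <;>
            first
              | (simp only [show j - i = 0 from by omega]; rfl)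
              | (simp only [show j - i = 1 from by omega]; rfl)
              | (simp only [show j - i = 2 from by omega]; rfl))
        | (congr 1; omega)
        | omega)

theorem calcALoop_true (m : Nat) (Hm : ∀ c, calcA c m true = calcA c m false - 1) :
    ∀ (k i : Nat) (best : Int) (c : List Int), 34 ≤ i + k →
      calcALoop c m true i best = calcALoop c m false i (best + 1) - 1 := by
  intro k
  induction k with
  | zero =>
    intro i best c h
    conv_lhs => rw [calcALoop]
    conv_rhs => rw [calcALoop]
    simp only [if_neg (show ¬ i < 34 by omega)]
    omega
  | succ k ih =>
    intro i best c h
    by_cases hi : i < 34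
    · conv_lhs => rw [calcALoop]
      conv_rhs => rw [calcALoop]
      simp only [if_pos hi]
      by_cases hz : c.getD i 0 = 0
      · simp only [if_pos hz]
        exact ih (i + 1) best c (by omega)
      · simp only [if_neg hz]
        rw [ih (i + 1) _ c (by omega)]
        congr 2
        by_cases h3 : 3 ≤ c.getD i 0 <;>
          by_cases hr : i < 27 ∧ i % 9 ≤ 6 ∧ 0 < c.getD (i + 1) 0 ∧ 0 < c.getD (i + 2) 0 <;>
            simp only [if_pos, if_neg, h3, hr, if_true, if_false] <;>
              simp only [Hm, min_def] <;> split_ifs <;> omega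
    · conv_lhs => rw [calcALoop]
      conv_rhs => rw [calcALoop]
      simp only [if_neg hi]
      omega

theorem calcA_true : ∀ (n : Nat) (c : List Int), calcA c n true = calcA c n false - 1 := by
  intro n
  induction n using Nat.strong_induction_on with
  | _ n ih =>
    intro c
    by_cases h0 : n = 0
    · subst h0; rw [calcA, calcA]; simp
    · conv_lhs => rw [calcA]
      conv_rhs => rw [calcA]
      simp only [if_neg h0, if_true, if_false]
      rw [calcALoop_true (n - 1) (fun c => ih (n - 1) (by omega) c) 34 0 _ c (by omega)]
      congr 2

def MemoInv (memo : PySem.Dict (List Int × Nat) Int) : Prop :=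
  ∀ (c : List Int) (n : Nat) (v : Int), memo.get? (c, n) = some v → v = calcA c n false

theorem memoInv_insert {memo : PySem.Dict (List Int × Nat) Int} {c : List Int} {n : Nat} {v : Int}
    (hm : MemoInv memo) (hv : v = calcA c n false) : MemoInv (memo.insert (c, n) v) := by
  intro c' n' v' h
  rw [PySem.Dict.get?_insert] at h
  split at h
  · next heq =>
    cases h
    have h1 : c' = c := (Prod.mk.injEq .. ▸ heq).1
    have h2 : n' = n := (Prod.mk.injEq .. ▸ heq).2
    subst h1; subst h2; exact hv
  · exact hm c' n' v' h

theorem distLoop_spec (m : Nat)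
    (Hm : ∀ memo c, c.length = 34 → MemoInv memo →
      (distAlt memo c m).1 = calcA c m false ∧ MemoInv (distAlt memo c m).2) :
    ∀ (k i : Nat) (val : Int) (memo : PySem.Dict (List Int × Nat) Int) (c : List Int),
      34 ≤ i + k → c.length = 34 → MemoInv memo →
      (distLoop memo c m i val).1 = calcALoop c m false i val ∧
        MemoInv (distLoop memo c m i val).2 := by
  intro k
  induction k with
  | zero =>
    intro i val memo c h hc hm
    rw [distLoop, calcALoop]
    simp only [if_neg (show ¬ i < 34 by omega)]
    exact ⟨by simp, hm⟩
  | succ k ih =>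
    intro i val memo c h hc hm
    by_cases hi : i < 34
    · rw [distLoop, calcALoop]
      simp only [if_pos hi]
      by_cases hz : c.getD i 0 = 0
      · simp only [if_pos hz, if_neg (show ¬ (3:Int) ≤ 0 by omega)]
        rw [hz]
        simp only [if_neg (show ¬ (3:Int) ≤ 0 by omega),
          if_neg (show ¬ ((0:Int) ≠ 0 ∧ i < 27 ∧ i % 9 ≤ 6 ∧ 0 < c.getD (i + 1) 0 ∧ 0 < c.getD (i + 2) 0) by simp)]
        exact ih (i + 1) val memo c (by omega) hc hm
      · simp only [if_neg hz]
        have hset : c.take i ++ [c.getD i 0 - 3] ++ c.drop (i + 1) = c.set i (c.getD i 0 - 3) :=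
          (set_eq_slice c i _ (by omega)).symm
        have hy : (c.set i (c.getD i 0 - 1)).getD (i + 1) 0 = c.getD (i + 1) 0 :=
          getD_set_ne c i (i + 1) _ (by omega)
        by_cases h3 : 3 ≤ c.getD i 0 <;>
          by_cases hr : i < 27 ∧ i % 9 ≤ 6 ∧ 0 < c.getD (i + 1) 0 ∧ 0 < c.getD (i + 2) 0
        · -- triplet and run
          have e3 : ((c.set i (c.getD i 0 - 1)).set (i + 1) (c.getD (i + 1) 0 - 1)).set (i + 2)
                (((c.set i (c.getD i 0 - 1)).set (i + 1) (c.getD (i + 1) 0 - 1)).getD (i + 2) 0 - 1)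
              = c.take i ++ [c.getD i 0 - 1, c.getD (i + 1) 0 - 1, c.getD (i + 2) 0 - 1]
                  ++ c.drop (i + 3) := by
            rw [getD_set_ne _ (i + 1) (i + 2) _ (by omega),
              getD_set_ne _ i (i + 2) _ (by omega)]
            exact set3_eq_slice c i _ _ _ (by omega)
          simp only [if_pos h3, if_pos hr, if_pos (And.intro hz hr), hy, e3]
          have f1 := Hm memo (c.set i (c.getD i 0 - 3)) (by simp [hc]) hm
          rw [hset]
          have f2 := Hm (distAlt memo (c.set i (c.getD i 0 - 3)) m).2
            (c.take i ++ [c.getD i 0 - 1, c.getD (i + 1) 0 - 1, c.getD (i + 2) 0 - 1]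
              ++ c.drop (i + 3))
            (by simp [hc]; omega) f1.2
          rw [f1.1, f2.1]
          exact ih (i + 1) _ _ c (by omega) hc f2.2
        · -- triplet only
          simp only [if_pos h3, if_neg hr,
            if_neg (show ¬ (c.getD i 0 ≠ 0 ∧ i < 27 ∧ i % 9 ≤ 6 ∧ 0 < c.getD (i + 1) 0 ∧ 0 < c.getD (i + 2) 0) by
              intro hcon; exact hr hcon.2)]
          have f1 := Hm memo (c.set i (c.getD i 0 - 3)) (by simp [hc]) hm
          rw [hset, f1.1]
          exact ih (i + 1) _ _ c (by omega) hc f1.2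
        · -- run only
          have e3 : ((c.set i (c.getD i 0 - 1)).set (i + 1) (c.getD (i + 1) 0 - 1)).set (i + 2)
                (((c.set i (c.getD i 0 - 1)).set (i + 1) (c.getD (i + 1) 0 - 1)).getD (i + 2) 0 - 1)
              = c.take i ++ [c.getD i 0 - 1, c.getD (i + 1) 0 - 1, c.getD (i + 2) 0 - 1]
                  ++ c.drop (i + 3) := by
            rw [getD_set_ne _ (i + 1) (i + 2) _ (by omega),
              getD_set_ne _ i (i + 2) _ (by omega)]
            exact set3_eq_slice c i _ _ _ (by omega)
          simp only [if_neg h3, if_pos hr, if_pos (And.intro hz hr), hy, e3]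
          have f2 := Hm memo
            (c.take i ++ [c.getD i 0 - 1, c.getD (i + 1) 0 - 1, c.getD (i + 2) 0 - 1]
              ++ c.drop (i + 3))
            (by simp [hc]; omega) hm
          rw [f2.1]
          exact ih (i + 1) _ _ c (by omega) hc f2.2
        · -- neither
          simp only [if_neg h3, if_neg hr,
            if_neg (show ¬ (c.getD i 0 ≠ 0 ∧ i < 27 ∧ i % 9 ≤ 6 ∧ 0 < c.getD (i + 1) 0 ∧ 0 < c.getD (i + 2) 0) by
              intro hcon; exact hr hcon.2)]
          exact ih (i + 1) _ _ c (by omega) hc hm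
    · rw [distLoop, calcALoop]
      simp only [if_neg hi]
      exact ⟨by simp, hm⟩

theorem distAlt_spec : ∀ (n : Nat) (memo : PySem.Dict (List Int × Nat) Int) (c : List Int),
    c.length = 34 → MemoInv memo →
    (distAlt memo c n).1 = calcA c n false ∧ MemoInv (distAlt memo c n).2 := by
  intro n
  induction n using Nat.strong_induction_on with
  | _ n ih =>
    intro memo c hc hm
    by_cases h0 : n = 0
    · subst h0
      rw [distAlt, calcA]
      simp only [if_pos rfl]
      exact ⟨rfl, hm⟩
    · rw [distAlt]
      simp only [if_neg h0]
      cases hget : memo.get? (c, n) with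
      | some v =>
        simp only [hget]
        refine ⟨hm c n v hget, hm⟩
      | none =>
        simp only [hget]
        have hloop := distLoop_spec (n - 1)
          (fun memo c hc hm => ih (n - 1) (by omega) memo c hc hm)
          34 0 ((n : Int) * 2 + 1) memo c (by omega) hc hm
        have hval : (distLoop memo c (n - 1) 0 ((n : Int) * 2 + 1)).1 = calcA c n false := by
          rw [hloop.1, calcA]
          simp only [if_neg h0]
          norm_num
        exact ⟨hval, memoInv_insert hloop.2 hval⟩

-- the pair candidates, position p onward, with fuel k
def pairList (base : List Int) (needed : Nat) : Nat → Nat → List Int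
  | 0, _ => []
  | k + 1, p =>
    if 2 ≤ base.getD p 0 then
      (calcA (base.set p (base.getD p 0 - 2)) needed true) :: pairList base needed k (p + 1)
    else pairList base needed k (p + 1)

theorem pairLoopA_eq (base : List Int) (needed : Nat) :
    ∀ (k p : Nat) (best : Int), 34 ≤ p + k → p + k ≤ 34 →
      pairLoopA base needed p best = (pairList base needed k p).foldl min best := by
  intro k
  induction k with
  | zero =>
    intro p best h h'
    rw [pairLoopA, pairList]
    simp only [if_neg (show ¬ p < 34 by omega)]
    rfl
  | succ k ih =>
    intro p best h h'
    rw [pairLoopA, pairList]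
    simp only [if_pos (show p < 34 by omega)]
    by_cases h2 : 2 ≤ base.getD p 0
    · simp only [if_pos h2, if_neg (show ¬ base.getD p 0 < 2 by omega)]
      rw [ih (p + 1) _ (by omega) (by omega)]
      rfl
    · simp only [if_neg h2, if_pos (show base.getD p 0 < 2 by omega)]
      exact ih (p + 1) best (by omega) (by omega)

theorem pairScan_eq (base : List Int) (needed : Nat) (hb : base.length = 34) :
    ∀ (k p : Nat) (acc : List Int) (memo : PySem.Dict (List Int × Nat) Int),
      34 ≤ p + k → p + k ≤ 34 → MemoInv memo →
      (pairScan base needed p (acc, memo)).1 = acc ++ pairList base needed k p ∧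
        MemoInv (pairScan base needed p (acc, memo)).2 := by
  intro k
  induction k with
  | zero =>
    intro p acc memo h h' hm
    rw [pairScan, pairList]
    simp only [if_neg (show ¬ p < 34 by omega)]
    exact ⟨by simp, hm⟩
  | succ k ih =>
    intro p acc memo h h' hm
    rw [pairScan, pairList]
    simp only [if_pos (show p < 34 by omega)]
    by_cases h2 : 2 ≤ base.getD p 0
    · simp only [if_pos h2]
      have hset : base.take p ++ [base.getD p 0 - 2] ++ base.drop (p + 1)
          = base.set p (base.getD p 0 - 2) := (set_eq_slice base p _ (by omega)).symm
      rw [hset]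
      have f := distAlt_spec needed memo (base.set p (base.getD p 0 - 2)) (by simp [hb]) hm
      have hrec := ih (p + 1) (acc ++ [(distAlt memo (base.set p (base.getD p 0 - 2)) needed).1 - 1])
        (distAlt memo (base.set p (base.getD p 0 - 2)) needed).2 (by omega) (by omega) f.2
      rw [hrec.1, f.1]
      refine ⟨?_, by rw [f.1] at hrec; exact hrec.2⟩
      rw [calcA_true]
      simp
    · simp only [if_neg h2]
      exact ih (p + 1) acc memo (by omega) (by omega) hm

theorem build_length (tiles : List Int) :
    (tiles.foldl
      (fun c t => if 0 ≤ t ∧ t < 34 then c.set t.toNat (c.getD t.toNat 0 + 1) else c)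
      (List.replicate 34 (0 : Int))).length = 34 := by
  suffices h : ∀ (l : List Int) (c : List Int),
      (l.foldl (fun c t => if 0 ≤ t ∧ t < 34 then c.set t.toNat (c.getD t.toNat 0 + 1) else c) c).length
        = c.length by
    have := h tiles (List.replicate 34 0)
    simp only [List.length_replicate] at this
    exact this
  intro l
  induction l with
  | nil => intro c; rfl
  | cons x xs ih =>
    intro c
    simp only [List.foldl_cons]
    rw [ih]
    split <;> simp

theorem memoInv_empty : MemoInv PySem.Dict.empty := by
  intro c n v h
  rw [PySem.Dict.get?_empty] at h
  cases h

theorem shanten_eq_alt (tiles : List Int) (mc : Int) :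
    shanten tiles mc = shanten_alt tiles mc := by
  unfold shanten shanten_alt
  dsimp only
  have hb := build_length tiles
  set C := tiles.foldl
    (fun c t => if 0 ≤ t ∧ t < 34 then c.set t.toNat (c.getD t.toNat 0 + 1) else c)
    (List.replicate 34 (0 : Int)) with hC
  set N := (max 0 (4 - mc)).toNat with hN
  have hpair := pairScan_eq C N hb 34 0 [max 0 (8 - mc * 2)] PySem.Dict.empty
    (by omega) (by omega) memoInv_empty
  have hA := pairLoopA_eq C N 34 0 (max 0 (8 - mc * 2)) (by omega) (by omega)
  have hd := distAlt_spec N (pairScan C N 0 ([max 0 (8 - mc * 2)], PySem.Dict.empty)).2 C hb hpair.2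
  have e1 : (fun (a c : Int) => if 2 ≤ c then a + 1 else a)
      = (fun (a c : Int) => a + (if 2 ≤ c then 1 else 0)) := by
    funext a c; split <;> omega
  have e2 : (fun (a : Int) (t : Nat) => if 1 ≤ C.getD t 0 then a + 1 else a)
      = (fun (a : Int) (t : Nat) => a + (if 1 ≤ C.getD t 0 then 1 else 0)) := by
    funext a t; split <;> omega
  rw [hA, hpair.1, hd.1, e1, e2]
  by_cases hmc : mc = 0
  · simp only [if_pos hmc]
    rw [List.singleton_append, List.cons_append, List.cons_append,
      PySem.List.min?_id_cons]
    simp only [Option.getD_some, List.foldl_append, List.foldl_cons, List.foldl_nil]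
  · simp only [if_neg hmc]
    rw [List.singleton_append, List.cons_append, PySem.List.min?_id_cons]
    simp only [Option.getD_some, List.foldl_append, List.foldl_cons, List.foldl_nil]

-- ===== VERDICT (by name: the statement is the Claim_ definition above) =====
theorem shanten_spec : Claim_equal_shanten := by
  intro tiles meld_count _
  unfold Spec_shanten
  exact shanten_eq_alt tiles meld_count
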